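-- pv_equiv track=rewrite | github.com/Drago-03/Documentation.AI | app.py | _generate_technology_stack_section
-- ===== SOURCE A (Python) =====
-- from typing import Dict, List, Any, Optional
--
-- def _generate_technology_stack_section(file_structure: Dict, technologies: Dict) -> str:
--     """Generate technology stack section"""
--     languages = file_structure.get('languages', {})
--     frameworks = technologies.get('frameworks', [])
--     databases = technologies.get('databases', [])
--     deployment = technologies.get('deployment', [])
--
--     stack_content = ""
--
--     if languages:
--         stack_content += "### Languages\n"
--         for lang, count in languages.items():
--             stack_content += f"- **{lang}**\n"
--         stack_content += "\n"
--
--     if frameworks: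
--         stack_content += "### Frameworks & Libraries\n"
--         for framework in frameworks:
--             stack_content += f"- {framework}\n"
--         stack_content += "\n"
--
--     if databases:
--         stack_content += "### Databases\n"
--         for db in databases:
--             stack_content += f"- {db}\n"
--         stack_content += "\n"
--
--     if deployment:
--         stack_content += "### Deployment & DevOps\n"
--         for tool in deployment:
--             stack_content += f"- {tool}\n"
--         stack_content += "\n"
--
--     return stack_content or "Technology stack information will be updated soon."
-- ===== SOURCE B (Python) =====
-- def _generate_technology_stack_section(file_structure, technologies):
--     """Generate technology stack section (recursive, line-based)."""
--     def emit(specs):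
--         # recursively build the list of output LINES (no trailing newlines)
--         if not specs:
--             return []
--         header, lines = specs[0]
--         rest = emit(specs[1:])
--         if not lines:
--             return rest
--         return [header] + lines + [""] + rest
--
--     langs = ["- **%s**" % k for k in file_structure.get('languages', {})]
--     fw = ["- %s" % x for x in technologies.get('frameworks', [])]
--     db = ["- %s" % x for x in technologies.get('databases', [])]
--     dep = ["- %s" % x for x in technologies.get('deployment', [])]
--     lines = emit([("### Languages", langs),
--                   ("### Frameworks & Libraries", fw),
--                   ("### Databases", db),
--                   ("### Deployment & DevOps", dep)])
--     if not lines: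
--         return "Technology stack information will be updated soon."
--     return "\n".join(lines) + "\n"
-- ===== Notes on version B (the rewrite author's own statement) =====
-- stated objective: alternative
-- what changed: Instead of concatenating newline-terminated fragments section by section, B recursively assembles a flat list of newline-free LINES (headers, bullets, blank separators) and produces the output as a single '\n'.join plus final newline, handling the empty case before joining.
import Mathlib
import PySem

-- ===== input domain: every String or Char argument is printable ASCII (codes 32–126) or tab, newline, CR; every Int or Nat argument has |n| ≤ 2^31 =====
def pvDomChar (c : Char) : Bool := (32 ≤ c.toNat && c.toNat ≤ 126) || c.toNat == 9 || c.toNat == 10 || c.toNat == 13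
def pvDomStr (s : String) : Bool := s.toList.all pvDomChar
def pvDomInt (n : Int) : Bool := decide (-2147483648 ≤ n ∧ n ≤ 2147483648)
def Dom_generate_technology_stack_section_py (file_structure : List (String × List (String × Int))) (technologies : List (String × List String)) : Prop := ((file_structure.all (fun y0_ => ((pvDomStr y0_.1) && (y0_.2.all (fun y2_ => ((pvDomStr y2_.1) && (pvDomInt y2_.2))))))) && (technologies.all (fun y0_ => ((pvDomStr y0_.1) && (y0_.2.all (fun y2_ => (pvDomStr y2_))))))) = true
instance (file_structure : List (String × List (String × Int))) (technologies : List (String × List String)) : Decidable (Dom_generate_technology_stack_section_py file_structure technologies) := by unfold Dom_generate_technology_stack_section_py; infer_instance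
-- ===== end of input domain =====

-- B builds a flat list of newline-free LINES by a recursive pass over section specs and joins them with "\n", instead of A's section-by-section concatenation of newline-terminated fragments; objective: alternative (different decomposition and intermediate data).

-- ===== PORT A =====
def generate_technology_stack_section_py (file_structure : List (String × List (String × Int))) (technologies : List (String × List String)) : String :=
  let languages := PySem.Dict.getD (PySem.Dict.mk file_structure) "languages" []
  let frameworks := PySem.Dict.getD (PySem.Dict.mk technologies) "frameworks" []
  let databases := PySem.Dict.getD (PySem.Dict.mk technologies) "databases" []
  let deployment := PySem.Dict.getD (PySem.Dict.mk technologies) "deployment" []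
  let sc : String := ""
  let sc := if languages = [] then sc else
    (languages.foldl (fun acc p => acc ++ "- **" ++ p.1 ++ "**\n") (sc ++ "### Languages\n")) ++ "\n"
  let sc := if frameworks = [] then sc else
    (frameworks.foldl (fun acc f => acc ++ "- " ++ f ++ "\n") (sc ++ "### Frameworks & Libraries\n")) ++ "\n"
  let sc := if databases = [] then sc else
    (databases.foldl (fun acc d => acc ++ "- " ++ d ++ "\n") (sc ++ "### Databases\n")) ++ "\n"
  let sc := if deployment = [] then sc else
    (deployment.foldl (fun acc t => acc ++ "- " ++ t ++ "\n") (sc ++ "### Deployment & DevOps\n")) ++ "\n"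
  if sc = "" then "Technology stack information will be updated soon." else sc

-- ===== PORT B =====
-- recursive helper 'emit' of Source B: specs → list of output lines
def pvEmit : List (String × List String) → List String
  | [] => []
  | (header, lines) :: rest =>
      let r := pvEmit rest
      if lines = [] then r else header :: lines ++ [""] ++ r

def generate_technology_stack_section_py_alt (file_structure : List (String × List (String × Int))) (technologies : List (String × List String)) : String :=
  let langs := (PySem.Dict.getD (PySem.Dict.mk file_structure) "languages" []).map (fun p => "- **" ++ p.1 ++ "**")
  let fw := (PySem.Dict.getD (PySem.Dict.mk technologies) "frameworks" []).map (fun x => "- " ++ x)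
  let db := (PySem.Dict.getD (PySem.Dict.mk technologies) "databases" []).map (fun x => "- " ++ x)
  let dep := (PySem.Dict.getD (PySem.Dict.mk technologies) "deployment" []).map (fun x => "- " ++ x)
  let lines := pvEmit [("### Languages", langs), ("### Frameworks & Libraries", fw),
                       ("### Databases", db), ("### Deployment & DevOps", dep)]
  if lines = [] then "Technology stack information will be updated soon."
  else PySem.Str.join "\n" lines ++ "\n"

-- ===== PRECONDITION & SPEC =====
def Spec_generate_technology_stack_section_py (file_structure : List (String × List (String × Int))) (technologies : List (String × List String)) (out : String) : Prop := out = generate_technology_stack_section_py_alt file_structure technologies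
instance (file_structure : List (String × List (String × Int))) (technologies : List (String × List String)) (out : String) : Decidable (Spec_generate_technology_stack_section_py file_structure technologies out) := by unfold Spec_generate_technology_stack_section_py; infer_instance

-- ===== CLAIM =====
def Claim_equal_generate_technology_stack_section_py : Prop := ∀ (file_structure : List (String × List (String × Int))) (technologies : List (String × List String)), Dom_generate_technology_stack_section_py file_structure technologies → Spec_generate_technology_stack_section_py file_structure technologies (generate_technology_stack_section_py file_structure technologies)

-- ===== LEMMAS AND PROOFS =====

theorem pv_join_cons_cons (sep a b : String) (l : List String) :
    PySem.Str.join sep (a :: b :: l) = a ++ sep ++ PySem.Str.join sep (b :: l) := by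
  simp [PySem.Str.join, PySem.Chars.join_cons_cons, String.append_assoc]

theorem pv_join_nil : PySem.Str.join "" [] = "" := rfl

theorem pv_join_cons (s : String) (l : List String) :
    PySem.Str.join "" (s :: l) = s ++ PySem.Str.join "" l := by
  cases l with
  | nil => simp [PySem.Str.join, PySem.Chars.join_singleton]
  | cons t ts => simp [pv_join_cons_cons]

theorem pv_join_append (a b : List String) :
    PySem.Str.join "" (a ++ b) = PySem.Str.join "" a ++ PySem.Str.join "" b := by
  induction a with
  | nil => simp [pv_join_nil]
  | cons h t ih => simp [pv_join_cons, ih, String.append_assoc]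

theorem pv_foldl_fmt {α : Type} (f : α → String) (l : List α) (s : String) :
    l.foldl (fun acc x => acc ++ f x) s = s ++ PySem.Str.join "" (l.map f) := by
  induction l generalizing s with
  | nil => simp [pv_join_nil]
  | cons a t ih => simp [pv_join_cons, ih, String.append_assoc]

-- "\n".join(lines) + "\n" = concatenation of the newline-terminated lines
theorem pv_joinNL (l : String) (ls : List String) :
    PySem.Str.join "\n" (l :: ls) ++ "\n" = PySem.Str.join "" ((l :: ls).map (fun x => x ++ "\n")) := by
  induction ls generalizing l with
  | nil => simp [PySem.Str.join, PySem.Chars.join_singleton]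
  | cons m ms ih =>
      rw [pv_join_cons_cons, String.append_assoc, String.append_assoc, ih m]
      simp [pv_join_cons, String.append_assoc]

-- ===== VERDICT =====
theorem generate_technology_stack_section_py_spec : Claim_equal_generate_technology_stack_section_py := by
  intro fs ts _
  unfold Spec_generate_technology_stack_section_py
  by_cases hL : PySem.Dict.getD (PySem.Dict.mk fs) "languages" ([] : List (String × Int)) = [] <;>
  by_cases hF : PySem.Dict.getD (PySem.Dict.mk ts) "frameworks" ([] : List String) = [] <;>
  by_cases hD : PySem.Dict.getD (PySem.Dict.mk ts) "databases" ([] : List String) = [] <;>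
  by_cases hP : PySem.Dict.getD (PySem.Dict.mk ts) "deployment" ([] : List String) = [] <;>
  simp [generate_technology_stack_section_py, generate_technology_stack_section_py_alt, pvEmit,
        hL, hF, hD, hP, List.map_eq_nil_iff, pv_foldl_fmt,
        pv_joinNL, pv_join_append, pv_join_cons, pv_join_nil,
        String.append_assoc, List.map_map, Function.comp_def] <;>
  rfl
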